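-- pv_equiv track=rewrite | github.com/sidonai-86/bootcamp-template-main | scripts/transform/transform_savan_s3.py | batch_generator_from_lines
-- ===== SOURCE A (Python) =====
-- from typing import Iterator, List
--
-- def batch_generator_from_lines(
--     lines: Iterator[str], batch_size=10
-- ) -> Iterator[List[str]]:
--     batch = []
--     for line in lines:
--         if line:
--             batch.append(line)
--         if len(batch) == batch_size:
--             yield batch
--             batch = []
--     if batch:
--         yield batch
-- ===== SOURCE B (Python) =====
-- import itertools
--
--
-- def batch_generator_from_lines(lines, batch_size=10):
--     it = (line for line in lines if line)
--     while True:
--         batch = list(itertools.islice(it, batch_size))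
--         if not batch:
--             return
--         yield batch
-- ===== Notes on version B (the rewrite author's own statement) =====
-- stated objective: idiomatic
-- what changed: Instead of appending line by line and testing len after each append, B filters the lines into one lazy iterator and pulls whole chunks of batch_size at a time with itertools.islice.
-- intended difference: For batch_size = 0 with a non-empty lines list, A yields an empty batch for every leading blank line plus one batch of all remaining non-empty lines, an accident of its len==0 test; B yields nothing, the intended result since no batch of size 0 exists. — e.g. on batch_generator_from_lines(["a"], 0): A returns [["a"]], B returns []
-- outside the precondition, e.g. on batch_generator_from_lines(['a'], -1): A returns [['a']], B raises ValueError
import Mathlib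
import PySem

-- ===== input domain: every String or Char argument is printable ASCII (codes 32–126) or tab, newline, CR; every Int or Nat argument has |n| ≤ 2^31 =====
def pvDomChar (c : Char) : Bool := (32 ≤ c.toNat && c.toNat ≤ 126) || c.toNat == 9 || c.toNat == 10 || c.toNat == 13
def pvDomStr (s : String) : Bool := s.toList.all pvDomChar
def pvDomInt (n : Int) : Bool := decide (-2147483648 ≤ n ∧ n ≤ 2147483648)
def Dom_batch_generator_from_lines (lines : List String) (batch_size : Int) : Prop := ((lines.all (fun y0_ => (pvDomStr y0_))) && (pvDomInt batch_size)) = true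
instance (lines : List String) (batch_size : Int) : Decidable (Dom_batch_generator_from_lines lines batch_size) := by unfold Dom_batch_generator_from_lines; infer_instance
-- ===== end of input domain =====

-- B restructures the batching: it filters the lines once and pulls whole chunks of batch_size
-- at a time (islice-style), instead of appending one line at a time and testing len; return
-- values proved equal on Pre_ outside D_ (A is a generator, equivalence is about the yielded list).

-- ===== PORT A =====
-- one fold step: append the truthy line, then flush when the batch reaches batch_size
def bglStep (batch_size : Int) (acc : List (List String) × List String) (line : String) :
    List (List String) × List String :=
  let batch := if line ≠ "" then acc.2 ++ [line] else acc.2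
  if (batch.length : Int) = batch_size then (acc.1 ++ [batch], []) else (acc.1, batch)

-- the trailing `if batch: yield batch`
def bglFinish (st : List (List String) × List String) : List (List String) :=
  if st.2 ≠ [] then st.1 ++ [st.2] else st.1

def batch_generator_from_lines (lines : List String) (batch_size : Int) : List (List String) :=
  bglFinish (lines.foldl (bglStep batch_size) ([], []))

-- ===== PORT B =====
-- chunk-pull loop: take a whole batch of n from the remaining filtered lines; stop on an empty batch
def bglChunks (n : Nat) (l : List String) : List (List String) :=
  let batch := l.take n
  if h : batch = [] then [] else batch :: bglChunks n (l.drop n)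
termination_by l.length
decreasing_by
  rw [List.take_eq_nil_iff, not_or] at h
  have h2 : 0 < l.length := List.length_pos_iff.mpr h.2
  simp only [List.length_drop]
  omega

def batch_generator_from_lines_alt (lines : List String) (batch_size : Int) : List (List String) :=
  -- batch_size.toNat is exact on Pre_ (0 ≤ batch_size); for negative batch_size the Python B raises ValueError
  bglChunks batch_size.toNat (lines.filter (fun line => line ≠ ""))

-- ===== PRECONDITION & SPEC =====
-- Pre_ excludes negative batch_size, where B's islice raises ValueError while A returns one oversized batch.
def Pre_batch_generator_from_lines (lines : List String) (batch_size : Int) : Prop :=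
  0 ≤ batch_size
instance (lines : List String) (batch_size : Int) : Decidable (Pre_batch_generator_from_lines lines batch_size) := by unfold Pre_batch_generator_from_lines; infer_instance
def pvWitness_batch_generator_from_lines : List String × Int := (["a", "", "b"], 2)

-- For batch_size = 0 with non-empty lines, A yields an empty batch per leading blank line plus one
-- batch of all remaining non-empty lines (an accident of its len==0 test); B yields nothing, the
-- intended result since no batch of size 0 exists.
def D_batch_generator_from_lines (lines : List String) (batch_size : Int) : Prop :=
  batch_size = 0 ∧ lines ≠ []
instance (lines : List String) (batch_size : Int) : Decidable (D_batch_generator_from_lines lines batch_size) := by unfold D_batch_generator_from_lines; infer_instance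

def Spec_batch_generator_from_lines (lines : List String) (batch_size : Int) (out : List (List String)) : Prop := ¬ D_batch_generator_from_lines lines batch_size → out = batch_generator_from_lines_alt lines batch_size
instance (lines : List String) (batch_size : Int) (out : List (List String)) : Decidable (Spec_batch_generator_from_lines lines batch_size out) := by unfold Spec_batch_generator_from_lines; infer_instance

def pvDiffWitness_batch_generator_from_lines : List String × Int := (["a"], 0)
def pvDiffWitnessOut_batch_generator_from_lines : (List (List String)) × (List (List String)) := ([["a"]], [])

-- ===== CLAIM (what is proved, stated in full; the proofs are below) =====
def Claim_unchanged_batch_generator_from_lines : Prop := ∀ (lines : List String) (batch_size : Int), Dom_batch_generator_from_lines lines batch_size → Pre_batch_generator_from_lines lines batch_size → Spec_batch_generator_from_lines lines batch_size (batch_generator_from_lines lines batch_size)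
def Claim_changed_batch_generator_from_lines : Prop := Dom_batch_generator_from_lines (pvDiffWitness_batch_generator_from_lines.1) (pvDiffWitness_batch_generator_from_lines.2) ∧ Pre_batch_generator_from_lines (pvDiffWitness_batch_generator_from_lines.1) (pvDiffWitness_batch_generator_from_lines.2) ∧ D_batch_generator_from_lines (pvDiffWitness_batch_generator_from_lines.1) (pvDiffWitness_batch_generator_from_lines.2) ∧ batch_generator_from_lines (pvDiffWitness_batch_generator_from_lines.1) (pvDiffWitness_batch_generator_from_lines.2) = pvDiffWitnessOut_batch_generator_from_lines.1 ∧ batch_generator_from_lines_alt (pvDiffWitness_batch_generator_from_lines.1) (pvDiffWitness_batch_generator_from_lines.2) = pvDiffWitnessOut_batch_generator_from_lines.2 ∧ pvDiffWitnessOut_batch_generator_from_lines.1 ≠ pvDiffWitnessOut_batch_generator_from_lines.2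
def Claim_exact_batch_generator_from_lines : Prop := ∀ (lines : List String) (batch_size : Int), Dom_batch_generator_from_lines lines batch_size → Pre_batch_generator_from_lines lines batch_size → D_batch_generator_from_lines lines batch_size → batch_generator_from_lines lines batch_size ≠ batch_generator_from_lines_alt lines batch_size

-- ===== LEMMAS AND PROOFS =====

theorem bgl_key (n : Nat) (hn : 1 ≤ n) (batch_size : Int) (hbs : (n : Int) = batch_size) :
    ∀ (lines : List String) (out : List (List String)) (batch : List String),
      batch.length < n →
      bglFinish (lines.foldl (bglStep batch_size) (out, batch))
      = out ++ bglChunks n (batch ++ lines.filter (fun line => line ≠ "")) := by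
  intro lines
  induction lines with
  | nil =>
    intro out batch hlt
    simp only [List.foldl_nil, List.filter_nil, List.append_nil, bglFinish]
    rw [bglChunks]
    by_cases hb : batch = []
    · simp [hb]
    · have htake : batch.take n = batch := List.take_of_length_le (le_of_lt hlt)
      simp [htake, hb]
      rw [bglChunks]
      simp [List.drop_eq_nil_of_le (le_of_lt hlt)]
  | cons line rest ih =>
    intro out batch hlt
    simp only [List.foldl_cons]
    by_cases hline : line = ""
    · -- falsy line: batch unchanged; no flush since batch.length < n = batch_size
      have hne : ¬ ((batch.length : Int) = batch_size) := by omega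
      have hstep : bglStep batch_size (out, batch) line = (out, batch) := by
        simp [bglStep, hline, hne]
      rw [hstep, ih out batch hlt]
      simp [hline]
    · by_cases hfull : batch.length + 1 = n
      · -- the appended line completes the batch: flush
        have hc2 : ((batch.length : Int) + 1 = batch_size) := by omega
        have hstep : bglStep batch_size (out, batch) line = (out ++ [batch ++ [line]], []) := by
          simp [bglStep, hline, hc2]
        rw [hstep, ih (out ++ [batch ++ [line]]) [] hn]
        have hfil : (line :: rest).filter (fun l => l ≠ "") =
            line :: rest.filter (fun l => l ≠ "") := by simp [hline]
        rw [hfil]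
        have hlen : (batch ++ [line]).length = n := by simp [← hfull]
        have heq : batch ++ line :: List.filter (fun l => !decide (l = "")) rest
            = (batch ++ [line]) ++ List.filter (fun l => !decide (l = "")) rest := by simp
        have htk : (batch ++ line :: List.filter (fun l => !decide (l = "")) rest).take n
            = batch ++ [line] := by rw [heq, ← hlen, List.take_left]
        have hdr : (batch ++ line :: List.filter (fun l => !decide (l = "")) rest).drop n
            = List.filter (fun l => !decide (l = "")) rest := by rw [heq, ← hlen, List.drop_left]
        have hbne : batch ++ [line] ≠ [] := by simp
        conv_rhs => rw [bglChunks]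
        simp [htk, hdr, hbne]
      · -- batch still short
        have hlt' : (batch ++ [line]).length < n := by
          simp only [List.length_append, List.length_cons, List.length_nil]
          omega
        have hc2 : ¬ ((batch.length : Int) + 1 = batch_size) := by omega
        have hstep : bglStep batch_size (out, batch) line = (out, batch ++ [line]) := by
          simp [bglStep, hline, hc2]
        rw [hstep, ih out (batch ++ [line]) hlt']
        have hfil : (line :: rest).filter (fun l => l ≠ "") =
            line :: rest.filter (fun l => l ≠ "") := by simp [hline]
        rw [hfil]
        simp

theorem bgl_inv0 (lines : List String) (hne : lines ≠ []) :
    batch_generator_from_lines lines 0 ≠ [] := by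
  -- invariant: after any step with batch_size = 0 the state has a yielded batch or a pending one
  have hstep : ∀ (s : List (List String) × List String) (l : String),
      (bglStep 0 s l).1 ≠ [] ∨ (bglStep 0 s l).2 ≠ [] := by
    intro s l
    unfold bglStep
    by_cases hl : l = "" <;> by_cases hz : (((if l ≠ "" then s.2 ++ [l] else s.2)).length : Int) = (0 : Int) <;>
      simp_all
  have hpres : ∀ (rest : List String) (s : List (List String) × List String),
      (s.1 ≠ [] ∨ s.2 ≠ []) →
      ((rest.foldl (bglStep 0) s).1 ≠ [] ∨ (rest.foldl (bglStep 0) s).2 ≠ []) := by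
    intro rest
    induction rest with
    | nil => intro s h; simpa using h
    | cons l rest ih => intro s _; exact ih _ (hstep s l)
  match lines, hne with
  | l :: rest, _ =>
    unfold batch_generator_from_lines
    simp only [List.foldl_cons]
    have h := hpres rest (bglStep 0 ([], []) l) (hstep ([], []) l)
    rcases h with h | h
    · by_cases h2 : (List.foldl (bglStep 0) (bglStep 0 ([], []) l) rest).2 = []
      · simp [bglFinish, h2, h]
      · simp [bglFinish, h2]
    · simp [bglFinish, h]

-- ===== VERDICT (by name: the statement is the Claim_ definition above) =====
theorem batch_generator_from_lines_spec : Claim_unchanged_batch_generator_from_lines := by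
  intro lines batch_size _ hpre hnd
  unfold Pre_batch_generator_from_lines at hpre
  unfold D_batch_generator_from_lines at hnd
  by_cases hz : batch_size = 0
  · have hlines : lines = [] := by
      by_contra h; exact hnd ⟨hz, h⟩
    subst hz hlines
    simp [batch_generator_from_lines, batch_generator_from_lines_alt, bglFinish, bglChunks]
  · have hbs : ((batch_size.toNat : Nat) : Int) = batch_size := Int.toNat_of_nonneg hpre
    have hn1 : 1 ≤ batch_size.toNat := by omega
    have := bgl_key batch_size.toNat hn1 batch_size hbs lines [] [] (by simp only [List.length_nil]; omega)
    unfold batch_generator_from_lines batch_generator_from_lines_alt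
    simpa using this

theorem batch_generator_from_lines_changed : Claim_changed_batch_generator_from_lines := by
  unfold Claim_changed_batch_generator_from_lines
  refine ⟨by decide, by decide, by decide, by decide, ?_, by decide⟩
  simp [batch_generator_from_lines_alt, pvDiffWitness_batch_generator_from_lines,
    pvDiffWitnessOut_batch_generator_from_lines, bglChunks]

theorem batch_generator_from_lines_tight : Claim_exact_batch_generator_from_lines := by
  intro lines batch_size _ _ hd
  obtain ⟨hz, hne⟩ := hd
  subst hz
  have hB : batch_generator_from_lines_alt lines 0 = [] := by
    unfold batch_generator_from_lines_alt
    rw [bglChunks]; simp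
  rw [hB]
  exact bgl_inv0 lines hne
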